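-- pv_equiv track=rewrite | github.com/shifop/datagrand_bert | ner/get_rt.py | split1
-- ===== SOURCE A (Python) =====
-- def split1(data):
--     """
--     将标记分离，适用于
--     “将A，B，C标签分为<*_S>,<*_O>,<*_E>三种，分别代表起始中间，结尾，由于最小字段仅1字，单字字段使用<*_S>标注，O标签统一使用<O>代表”
--     :param data:
--     :return:
--     """
--     rt = []
--     tag = []
--     cache = []
--     o_c = 0
--     for index,x in enumerate(data):
--         cache.append(str(index))
--         if x =='O':
--             o_c += 1
--         if ('S' in x and len(cache) > 1) or (x == 'O' and o_c == 1 and len(cache)> 1):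
--             # if o_c != 1 or not (x == 'O' and o_c == 1 and len(cache)> 1):
--             if not (x == 'O' and o_c == 1 and len(cache) > 1):
--                 o_c = 0
--             rt.append('_'.join(cache[:-1]))
--             cache = [cache[-1]]
--             if len(data[index-1]) > 1:
--                 tag.append(data[index-1][1])
--             else:
--                 tag.append(data[index-1])
--     if len(cache)!=0:
--         rt.append('_'.join(cache))
--         if len(data[-1])>1:
--             tag.append(data[-1][1])
--         else:
--             tag.append(data[-1])
--     return rt,tag
-- ===== SOURCE B (Python) =====
-- def split1(data):
--     n = len(data)
--     if n == 0:
--         return [], []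
--     # phase 1: find cut indices (segment starts), same o_c bookkeeping
--     cuts = []
--     o_c = 0
--     start = 0
--     for i, x in enumerate(data):
--         if x == 'O':
--             o_c += 1
--         if i > start and ('S' in x or (x == 'O' and o_c == 1)):
--             if x != 'O' or o_c != 1:
--                 o_c = 0
--             cuts.append(i)
--             start = i
--     # phase 2: build the outputs from the boundary list
--     bounds = [0] + cuts + [n]
--     rt = ['_'.join(str(j) for j in range(a, b))
--           for a, b in zip(bounds, bounds[1:])]
--     tag = [data[b - 1][1] if len(data[b - 1]) > 1 else data[b - 1]
--            for b in bounds[1:]]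
--     return rt, tag
-- ===== Notes on version B (the rewrite author's own statement) =====
-- stated objective: alternative
-- what changed: B drops A's running cache list of stringified indices: a first pass records only the cut boundary indices (same o_c bookkeeping), and a second phase rebuilds every segment string by joining str(j) over range(a,b) between consecutive boundaries and derives each tag from data[boundary-1].
import Mathlib
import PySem

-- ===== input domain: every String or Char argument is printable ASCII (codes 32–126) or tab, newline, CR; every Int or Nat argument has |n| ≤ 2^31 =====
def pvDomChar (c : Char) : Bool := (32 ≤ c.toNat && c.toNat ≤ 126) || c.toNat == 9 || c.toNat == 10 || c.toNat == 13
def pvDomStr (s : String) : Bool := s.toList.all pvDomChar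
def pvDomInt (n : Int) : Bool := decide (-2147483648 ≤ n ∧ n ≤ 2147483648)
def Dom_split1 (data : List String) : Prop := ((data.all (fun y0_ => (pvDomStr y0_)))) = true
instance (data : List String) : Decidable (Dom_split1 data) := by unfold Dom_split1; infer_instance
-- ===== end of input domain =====

-- B replaces A's running cache of stringified indices by a first pass that records only the
-- cut indices and a second phase that rebuilds segments with range() joins (objective: alternative).

-- ===== PORT A =====
-- the tag selection `data[j][1] if len(data[j]) > 1 else data[j]`, a subexpression both Pythons
-- share; at every call site j is a valid Python index, so the .getD defaults are unreachable
def split1TagAt (data : List String) (j : Int) : String :=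
  let p := (PySem.List.pyGet? data j).getD ""
  if PySem.Str.len p > 1 then String.ofList [(PySem.Str.pyGet? p 1).getD ' '] else p

-- the `for index,x in enumerate(data)` loop of A, state (rt, tag, cache, o_c)
def split1Go (data : List String) (l : List String) (i : Nat)
    (rt tag cache : List String) (oc : Int) : List String × List String × List String × Int :=
  match l with
  | [] => (rt, tag, cache, oc)
  | x :: rest =>
    let cache := cache ++ [PySem.Int.toStr (i : Int)]
    let oc := if x = "O" then oc + 1 else oc
    if (PySem.Str.isIn "S" x = true ∧ cache.length > 1) ∨ (x = "O" ∧ oc = 1 ∧ cache.length > 1) then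
      let oc2 := if ¬ (x = "O" ∧ oc = 1 ∧ cache.length > 1) then 0 else oc
      split1Go data rest (i+1)
        (rt ++ [PySem.Str.join "_" (PySem.List.slice cache none (some (-1)))])
        (tag ++ [split1TagAt data ((i : Int) - 1)])
        [(PySem.List.pyGet? cache (-1)).getD ""] oc2
    else split1Go data rest (i+1) rt tag cache oc

def split1 (data : List String) : List String × List String :=
  match split1Go data data 0 [] [] [] 0 with
  | (rt, tag, cache, _) =>
    if cache.length ≠ 0 then
      (rt ++ [PySem.Str.join "_" cache], tag ++ [split1TagAt data (-1)])
    else (rt, tag)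

-- ===== PORT B =====
-- phase 1: record the cut indices only, state (cuts, o_c, start)
def split1AltGo (l : List String) (i : Nat) (cuts : List Nat) (oc : Int) (start : Nat) :
    List Nat × Int × Nat :=
  match l with
  | [] => (cuts, oc, start)
  | x :: rest =>
    let oc := if x = "O" then oc + 1 else oc
    if i > start ∧ (PySem.Str.isIn "S" x = true ∨ (x = "O" ∧ oc = 1)) then
      let oc2 := if x ≠ "O" ∨ oc ≠ 1 then 0 else oc
      split1AltGo rest (i+1) (cuts ++ [i]) oc2 i
    else split1AltGo rest (i+1) cuts oc start

-- '_'.join(str(j) for j in range(a, b))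
def split1Seg (a b : Nat) : String :=
  PySem.Str.join "_" ((PySem.List.pyRange a b 1).map PySem.Int.toStr)

def split1_alt (data : List String) : List String × List String :=
  let n := data.length
  if n = 0 then ([], []) else
  match split1AltGo data 0 [] 0 0 with
  | (cuts, _, _) =>
    let bounds := 0 :: (cuts ++ [n])
    ((bounds.zip (cuts ++ [n])).map (fun p => split1Seg p.1 p.2),
     (cuts ++ [n]).map (fun (b : Nat) => split1TagAt data ((b : Int) - 1)))

-- ===== PRECONDITION & SPEC =====
def Spec_split1 (data : List String) (out : List String × List String) : Prop := out = split1_alt data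
instance (data : List String) (out : List String × List String) : Decidable (Spec_split1 data out) := by unfold Spec_split1; infer_instance

-- ===== CLAIM (what is proved, stated in full; the proofs are below) =====
def Claim_equal_split1 : Prop := ∀ (data : List String), Dom_split1 data → Spec_split1 data (split1 data)

-- ===== LEMMAS AND PROOFS =====

-- A's cache after consuming indices [a, b): the stringified indices a, …, b-1
def cacheOf (a b : Nat) : List String := (PySem.List.pyRange a b 1).map PySem.Int.toStr

-- rt rebuilt from a cut list, tag rebuilt from a cut list
def segsOf (cuts : List Nat) : List String :=
  ((0 :: cuts).zip cuts).map (fun p => split1Seg p.1 p.2)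
def tagsOf (data : List String) (cuts : List Nat) : List String :=
  cuts.map (fun (b : Nat) => split1TagAt data ((b : Int) - 1))

lemma cache_snoc (a b : Nat) (h : a ≤ b) :
    cacheOf a b ++ [PySem.Int.toStr (b : Int)] = cacheOf a (b+1) := by
  unfold cacheOf
  rw [show ((b+1 : Nat) : Int) = (b : Int) + 1 by push_cast; ring,
      PySem.List.pyRange_one_succ_right (by exact_mod_cast h), List.map_append]
  rfl

lemma cache_len (a b : Nat) : (cacheOf a b).length = b - a := by
  unfold cacheOf
  rw [List.length_map, PySem.List.length_pyRange_one]
  omega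

lemma cache_singleton (i : Nat) : cacheOf i (i+1) = [PySem.Int.toStr (i : Int)] := by
  unfold cacheOf
  rw [show ((i+1 : Nat) : Int) = (i : Int) + 1 by push_cast; ring,
      PySem.List.pyRange_one_singleton]
  rfl

lemma cache_join (a b : Nat) : PySem.Str.join "_" (cacheOf a b) = split1Seg a b := rfl

lemma zip_snoc (i : Nat) (c : List Nat) : ∀ (a : Nat),
    ((a :: (c ++ [i])).zip (c ++ [i])) = ((a :: c).zip c) ++ [(c.getLastD a, i)] := by
  induction c with
  | nil => intro a; simp
  | cons b c ih =>
    intro a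
    simp only [List.cons_append, List.zip_cons_cons, ih b, List.getLastD_cons]

lemma segsOf_snoc (c : List Nat) (i : Nat) :
    segsOf (c ++ [i]) = segsOf c ++ [split1Seg (c.getLastD 0) i] := by
  unfold segsOf
  rw [zip_snoc i c 0, List.map_append]
  rfl

lemma tagsOf_snoc (data : List String) (c : List Nat) (i : Nat) :
    tagsOf data (c ++ [i]) = tagsOf data c ++ [split1TagAt data ((i : Int) - 1)] := by
  unfold tagsOf; rw [List.map_append]; rfl

-- phase-1 invariant: the final start is the last recorded cut (0 if none) and lies below i+len
lemma altGo_props (l : List String) : ∀ (i : Nat) (cuts : List Nat) (oc : Int) (s : Nat),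
    cuts.getLastD 0 = s →
    (split1AltGo l i cuts oc s).1.getLastD 0 = (split1AltGo l i cuts oc s).2.2 ∧
    ((split1AltGo l i cuts oc s).2.2 = s ∨
      (i ≤ (split1AltGo l i cuts oc s).2.2 ∧ (split1AltGo l i cuts oc s).2.2 < i + l.length)) := by
  induction l with
  | nil => intro i cuts oc s h; simpa [split1AltGo] using h
  | cons x rest ih =>
    intro i cuts oc s h
    simp only [split1AltGo]
    by_cases hC : i > s ∧ (PySem.Str.isIn "S" x = true ∨
        (x = "O" ∧ (if x = "O" then oc + 1 else oc) = 1))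
    · rw [if_pos hC]
      rcases ih (i+1) (cuts ++ [i]) _ i (by simp) with ⟨ha, hb⟩
      refine ⟨ha, ?_⟩
      simp only [List.length_cons]
      omega
    · rw [if_neg hC]
      rcases ih (i+1) cuts _ s h with ⟨ha, hb⟩
      refine ⟨ha, ?_⟩
      simp only [List.length_cons]
      omega

-- the main simulation: A's loop from a mid-state equals B's phase 1 plus reconstruction
lemma go_eq (data : List String) (l : List String) : ∀ (i s : Nat) (oc : Int) (cuts : List Nat),
    s ≤ i →
    cuts.getLastD 0 = s →
    split1Go data l i (segsOf cuts) (tagsOf data cuts) (cacheOf s i) oc =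
      (segsOf (split1AltGo l i cuts oc s).1,
       tagsOf data (split1AltGo l i cuts oc s).1,
       cacheOf (split1AltGo l i cuts oc s).2.2 (i + l.length),
       (split1AltGo l i cuts oc s).2.1) := by
  induction l with
  | nil =>
    intro i s oc cuts h1 h2
    simp [split1Go, split1AltGo]
  | cons x rest ih =>
    intro i s oc cuts h1 h2
    simp only [split1Go, split1AltGo, cache_snoc s i h1]
    have hl : (cacheOf s (i+1)).length = i + 1 - s := cache_len s (i+1)
    by_cases hC : i > s ∧ (PySem.Str.isIn "S" x = true ∨
        (x = "O" ∧ (if x = "O" then oc + 1 else oc) = 1))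
    · have hA : (PySem.Str.isIn "S" x = true ∧ (cacheOf s (i+1)).length > 1) ∨
          (x = "O" ∧ (if x = "O" then oc + 1 else oc) = 1 ∧ (cacheOf s (i+1)).length > 1) := by
        rcases hC with ⟨hgt, hor⟩
        rcases hor with h' | h'
        · exact Or.inl ⟨h', by omega⟩
        · exact Or.inr ⟨h'.1, h'.2, by omega⟩
      rw [if_pos hA, if_pos hC]
      have hoc : (if ¬ (x = "O" ∧ (if x = "O" then oc + 1 else oc) = 1 ∧
            (cacheOf s (i+1)).length > 1) then 0 else (if x = "O" then oc + 1 else oc)) =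
          (if x ≠ "O" ∨ (if x = "O" then oc + 1 else oc) ≠ 1 then 0
            else (if x = "O" then oc + 1 else oc)) := by
        by_cases hxo : x = "O" ∧ (if x = "O" then oc + 1 else oc) = 1
        · have n1 : ¬¬(x = "O" ∧ (if x = "O" then oc + 1 else oc) = 1 ∧
              (cacheOf s (i+1)).length > 1) := not_not_intro ⟨hxo.1, hxo.2, by omega⟩
          have n2 : ¬(x ≠ "O" ∨ (if x = "O" then oc + 1 else oc) ≠ 1) := by
            rw [not_or, not_not, not_not]
            exact ⟨hxo.1, hxo.2⟩
          rw [if_neg n1, if_neg n2]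
        · rw [if_pos (fun h' => hxo ⟨h'.1, h'.2.1⟩), if_pos (not_and_or.mp hxo)]
      rw [hoc]
      have hsl : PySem.List.slice (cacheOf s (i+1)) none (some (-1)) = cacheOf s i := by
        rw [PySem.List.slice_to_neg_one, ← cache_snoc s i h1, List.dropLast_concat]
      have hlast : (PySem.List.pyGet? (cacheOf s (i+1)) (-1)).getD "" =
          PySem.Int.toStr (i : Int) := by
        rw [← cache_snoc s i h1, PySem.List.pyGet?_neg_one_append_singleton]
        rfl
      rw [hsl, hlast, cache_join, ← h2, ← segsOf_snoc, ← tagsOf_snoc,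
          show [PySem.Int.toStr (i : Int)] = cacheOf i (i+1) from (cache_singleton i).symm,
          List.length_cons, show i + (rest.length + 1) = (i+1) + rest.length by omega]
      exact ih (i+1) i _ (cuts ++ [i]) (by omega) (by simp)
    · have hA : ¬ ((PySem.Str.isIn "S" x = true ∧ (cacheOf s (i+1)).length > 1) ∨
          (x = "O" ∧ (if x = "O" then oc + 1 else oc) = 1 ∧ (cacheOf s (i+1)).length > 1)) := by
        intro h'
        apply hC
        rcases h' with ⟨h3, h4⟩ | ⟨h3, h4, h5⟩
        · exact ⟨by omega, Or.inl h3⟩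
        · exact ⟨by omega, Or.inr ⟨h3, h4⟩⟩
      rw [if_neg hA, if_neg hC, List.length_cons,
          show i + (rest.length + 1) = (i+1) + rest.length by omega]
      exact ih (i+1) s _ cuts (by omega) h2

-- ===== VERDICT (by name: the statement is the Claim_ definition above) =====
lemma tagAt_neg_one (data : List String) (h : data ≠ []) :
    split1TagAt data (-1) = split1TagAt data ((data.length : Int) - 1) := by
  unfold split1TagAt
  rw [PySem.List.pyGet?_neg_one,
      show ((data.length : Int) - 1) = ((data.length - 1 : Nat) : Int) by
        have : data.length ≠ 0 := by simpa using h
        omega,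
      PySem.List.pyGet?_natCast, List.getLast?_eq_getElem?]

lemma cacheOf_zero : cacheOf 0 0 = [] := by
  unfold cacheOf
  rw [show ((0 : Nat) : Int) = 0 by rfl, PySem.List.pyRange_one_eq_nil (by norm_num)]
  rfl

-- ===== VERDICT (by name: the statement is the Claim_ definition above) =====
theorem split1_spec : Claim_equal_split1 := by
  intro data _
  unfold Spec_split1
  rcases data with _ | ⟨y, ys⟩
  · rfl
  · have hmain := go_eq (y :: ys) (y :: ys) 0 0 0 [] (by omega) rfl
    rcases hr : split1AltGo (y :: ys) 0 [] 0 0 with ⟨c', oc', s'⟩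
    rw [hr] at hmain
    obtain ⟨hlast, hs⟩ := altGo_props (y :: ys) 0 [] 0 0 rfl
    rw [hr] at hs
    rw [hr] at hlast
    dsimp only at hmain hlast hs
    have hs' : s' < (y :: ys).length := by
      rcases hs with h | h
      · rw [h]; simp
      · omega
    rw [cacheOf_zero, show segsOf [] = [] from rfl, show tagsOf (y :: ys) [] = [] from rfl,
        Nat.zero_add] at hmain
    unfold split1 split1_alt
    rw [hmain, hr]
    dsimp only
    rw [if_pos (by rw [cache_len]; omega), if_neg (by simp)]
    rw [cache_join]
    show (segsOf c' ++ [split1Seg s' (y :: ys).length],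
          tagsOf (y :: ys) c' ++ [split1TagAt (y :: ys) (-1)]) =
        (segsOf (c' ++ [(y :: ys).length]), tagsOf (y :: ys) (c' ++ [(y :: ys).length]))
    rw [segsOf_snoc, hlast, tagsOf_snoc, tagAt_neg_one (y :: ys) (by simp)]
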